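-- pv_equiv track=rewrite | github.com/rakib06/LearnPythonBasic | Thesis/DFLP_31_oct_code/DFLP_31_oct_code/src/main.py | shiftCost
-- ===== SOURCE A (Python) =====
-- def shiftCost(myList, departments):
--
--     shiftCost = []
--     flowCost = []
--     flowCost2 = []
--
--     for i in range(3,len(myList)):
--         if i >= len(myList) - departments :
--             shiftCost.append(myList[i])
--         else:
--             if len(flowCost) >= 6:
--                 # print (len(flowCost)   % departments )
--                 flowCost2.append(flowCost)
--                 flowCost =[]
--                 flowCost.append(myList[i])
--             else:
--                 flowCost.append(myList[i])
--     return shiftCost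
-- ===== SOURCE B (Python) =====
-- def shiftCost(myList, departments):
--     start = max(3, len(myList) - departments)
--     return myList[start:]
-- ===== Notes on version B (the rewrite author's own statement) =====
-- stated objective: simpler
-- what changed: B replaces A's per-element index loop with dead flowCost bookkeeping by a closed-form start index max(3, len(myList)-departments) and a single slice.
import Mathlib
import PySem

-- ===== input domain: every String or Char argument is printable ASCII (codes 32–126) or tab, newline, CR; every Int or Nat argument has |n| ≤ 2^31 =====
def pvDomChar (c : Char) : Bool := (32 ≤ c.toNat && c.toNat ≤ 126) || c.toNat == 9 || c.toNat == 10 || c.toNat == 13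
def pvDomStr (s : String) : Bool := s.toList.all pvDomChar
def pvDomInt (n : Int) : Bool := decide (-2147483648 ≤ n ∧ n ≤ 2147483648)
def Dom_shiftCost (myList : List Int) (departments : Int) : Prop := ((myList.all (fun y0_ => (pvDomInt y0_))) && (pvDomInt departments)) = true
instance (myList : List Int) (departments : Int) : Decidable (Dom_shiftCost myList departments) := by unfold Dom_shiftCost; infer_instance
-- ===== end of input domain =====

-- B computes the returned suffix directly via start = max(3, len - departments) and one slice,
-- dropping A's dead flowCost/flowCost2 bookkeeping; equivalence is about the return value only.

-- ===== PORT A =====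
-- literal port of A: a fold over range(3, len(myList)) carrying (shiftCost, flowCost, flowCost2);
-- myList[i] is always in range here, so pyGetD (with default 0) is exact.
def shiftCost (myList : List Int) (departments : Int) : List Int :=
  (((PySem.List.pyRange 3 (myList.length : Int) 1).foldl
      (fun (st : List Int × List Int × List (List Int)) i =>
        if (myList.length : Int) - departments ≤ i then
          (st.1 ++ [PySem.List.pyGetD myList i 0], st.2.1, st.2.2)
        else
          if 6 ≤ st.2.1.length then
            (st.1, [PySem.List.pyGetD myList i 0], st.2.2 ++ [st.2.1])
          else
            (st.1, st.2.1 ++ [PySem.List.pyGetD myList i 0], st.2.2))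
      ([], [], [])) : List Int × List Int × List (List Int)).1

-- ===== PORT B =====
def shiftCost_alt (myList : List Int) (departments : Int) : List Int :=
  let start : Int := max 3 ((myList.length : Int) - departments)
  PySem.List.slice myList (some start) none

-- ===== PRECONDITION & SPEC =====
def Spec_shiftCost (myList : List Int) (departments : Int) (out : List Int) : Prop := out = shiftCost_alt myList departments
instance (myList : List Int) (departments : Int) (out : List Int) : Decidable (Spec_shiftCost myList departments out) := by unfold Spec_shiftCost; infer_instance

-- ===== CLAIM (what is proved, stated in full; the proofs are below) =====
def Claim_equal_shiftCost : Prop := ∀ (myList : List Int) (departments : Int), Dom_shiftCost myList departments → Spec_shiftCost myList departments (shiftCost myList departments)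

-- ===== LEMMAS AND PROOFS =====


-- state projection: the flowCost/flowCost2 components never influence the shiftCost component,
-- which collects exactly the in-range elements satisfying the condition, in order
theorem shiftCost_foldl_proj (myList : List Int) (departments : Int)
    (idxs : List Int) (sc fc : List Int) (fc2 : List (List Int)) :
    ((idxs.foldl
      (fun (st : List Int × List Int × List (List Int)) i =>
        if (myList.length : Int) - departments ≤ i then
          (st.1 ++ [PySem.List.pyGetD myList i 0], st.2.1, st.2.2)
        else
          if 6 ≤ st.2.1.length then
            (st.1, [PySem.List.pyGetD myList i 0], st.2.2 ++ [st.2.1])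
          else
            (st.1, st.2.1 ++ [PySem.List.pyGetD myList i 0], st.2.2))
      (sc, fc, fc2)).1 : List Int)
    = sc ++ (idxs.filter (fun i => (myList.length : Int) - departments ≤ i)).map
        (fun i => PySem.List.pyGetD myList i 0) := by
  induction idxs generalizing sc fc fc2 with
  | nil => simp
  | cons a t ih =>
    by_cases h : (myList.length : Int) - departments ≤ a
    · simp only [List.foldl_cons, List.filter_cons, eq_true h, if_true, decide_true,
        List.map_cons, ih, List.append_assoc, List.singleton_append]
    · by_cases h6 : 6 ≤ fc.length
      · simp only [List.foldl_cons, List.filter_cons, eq_false h, if_false, decide_false,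
          eq_true h6, if_true, ih, Bool.false_eq_true, if_false]
      · simp only [List.foldl_cons, List.filter_cons, eq_false h, if_false, decide_false,
          eq_false h6, ih, Bool.false_eq_true, if_false]

-- the filtered-range sum: the kept indices form the suffix of the range from the start index
theorem shiftCost_range_filter (myList : List Int) (departments : Int) :
    ((PySem.List.pyRange 3 (myList.length : Int) 1).filter
        (fun i => (myList.length : Int) - departments ≤ i)).map
      (fun i => PySem.List.pyGetD myList i 0)
    = PySem.List.slice myList (some (max 3 ((myList.length : Int) - departments))) none := by
  set m : Int := (myList.length : Int) with hm
  set c : Int := m - departments with hc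
  have hslice : PySem.List.slice myList (some (max 3 c)) none = myList.drop (max 3 c).toNat :=
    PySem.List.slice_from myList (le_trans (by norm_num) (le_max_left 3 c))
  rw [hslice]
  by_cases h3 : c ≤ 3
  · have hmax : max 3 c = 3 := max_eq_left h3
    rw [hmax]
    have hfilter : (PySem.List.pyRange 3 m 1).filter (fun i => decide (c ≤ i))
        = PySem.List.pyRange 3 m 1 := by
      apply List.filter_eq_self.mpr
      intro x hx
      have := (PySem.List.mem_pyRange_one).mp hx
      simp only [decide_eq_true_eq]
      omega
    rw [hfilter]
    have := PySem.List.map_pyGetD_pyRange myList 0 (a := 3) (by norm_num)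
    simp only [PySem.List.len_eq] at this ⊢
    rw [this]
  · rw [not_le] at h3
    have hmax : max 3 c = c := max_eq_right (le_of_lt h3)
    rw [hmax]
    by_cases hcm : m ≤ c
    · -- the whole range fails the filter; the drop is past the end
      have hfilter : (PySem.List.pyRange 3 m 1).filter (fun i => decide (c ≤ i)) = [] := by
        apply List.filter_eq_nil_iff.mpr
        intro x hx
        have := (PySem.List.mem_pyRange_one).mp hx
        simp only [decide_eq_true_eq]
        omega
      have hdrop : myList.drop c.toNat = [] := by
        apply List.drop_eq_nil_of_le
        omega
      simp [hfilter, hdrop]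
    · rw [not_le] at hcm
      rw [PySem.List.pyRange_one_append 3 c m (by omega) (le_of_lt hcm),
          List.filter_append]
      have h1 : (PySem.List.pyRange 3 c 1).filter (fun i => decide (c ≤ i)) = [] := by
        apply List.filter_eq_nil_iff.mpr
        intro x hx
        have := (PySem.List.mem_pyRange_one).mp hx
        simp only [decide_eq_true_eq]
        omega
      have h2 : (PySem.List.pyRange c m 1).filter (fun i => decide (c ≤ i))
          = PySem.List.pyRange c m 1 := by
        apply List.filter_eq_self.mpr
        intro x hx
        have := (PySem.List.mem_pyRange_one).mp hx
        simp only [decide_eq_true_eq]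
        omega
      rw [h1, h2]
      have := PySem.List.map_pyGetD_pyRange myList 0 (a := c) (by omega)
      simp only [PySem.List.len_eq] at this ⊢
      simpa using this

-- ===== VERDICT (by name: the statement is the Claim_ definition above) =====
theorem shiftCost_spec : Claim_equal_shiftCost := by
  intro myList departments _
  unfold Spec_shiftCost shiftCost shiftCost_alt
  rw [shiftCost_foldl_proj myList departments _ [] [] []]
  simpa using shiftCost_range_filter myList departments
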